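-- pv_equiv track=rewrite | github.com/Schaudge/pgr-tk | pgr-tk/pgrtk/__init__.py | group_smps_by_principle_bundle_id
-- ===== SOURCE A (Python) =====
-- def group_smps_by_principle_bundle_id(smps, len_cutoff=2500, merge_length=5000):
--     """ Filter and group SHIMMER pair output from SeqIndexDB.get_principal_bundle_decomposition()
--         by bundle id. This function will filter out small bundle segment with lenght smaller than
--         `len_curoff` and merge two bundle with the same id and direction within `merge_length`
--
--         TODO: This is currently implemented in python, we plan to move this as
--         Rust code in the future.
--
--     Parameters
--     ----------
--     len_cutoff: int
--         the length cutoff used for filtering small bundle segment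
--
--     merge_length: int
--         the length determining if two bundles should be merged
--
--     Returns
--     -------
--     list
--         a list of the lists of SHIMMER pairs tagged with bundle id, direction, position in the bundle
--
--         each element of the list SHIMMER is a tuple of
--         `((shimmer0, shimmer1, pos0, pos1, direction),
--         bundle_id, direction_to_the_bundle, position_in bundle)`
--     """
--
--     pbid, pdirection = None, None
--     all_partitions = []
--     new_partition = []
--     for smp, bundle_info in smps:
--         if bundle_info is None:
--             continue
--         d = 0 if smp[4] == bundle_info[1] else 1
--         bid = bundle_info[0]
--         bpos = bundle_info[2]
--         if pbid is None and pdirection is None: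
--             new_partition = []
--             new_partition.append( (smp, bid, d, bpos) )
--             pbid = bid
--             pdirection = d
--             continue
--         if bid != pbid or d != pdirection:
--             if new_partition[-1][0][3] -  new_partition[0][0][2] > len_cutoff:
--                 all_partitions.append(new_partition)
--                 new_partition = []
--             else:
--                 new_partition = []
--             pbid = bid
--             pdirection = d
--
--         new_partition.append( (smp, bid, d, bpos) )
--
--     if len(new_partition) != 0 and new_partition[-1][0][3] -  new_partition[0][0][2] > len_cutoff:
--         all_partitions.append(new_partition)
--
--     rtn_partitions = []
--     if len(all_partitions) == 0:
--         return rtn_partitions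
--
--     partition = all_partitions[0]
--
--     for p in all_partitions[1:]:
--
--         p_end = partition[-1][0][3]
--         p_bid = partition[-1][1]
--         p_d = partition[-1][2]
--         np_bgn = p[0][0][2]
--         np_bid = p[0][1]
--         np_d = p[0][2]
--         if p_bid == np_bid and p_d == np_d and abs(np_bgn - p_end) < merge_length:
--             partition.extend(p)
--         else:
--             rtn_partitions.append(partition)
--             partition = p
--     rtn_partitions.append(partition)
--
--     return rtn_partitions
-- ===== SOURCE B (Python) =====
-- def _flush(run, out, len_cutoff, merge_length):
--     # Emit a finished run directly into the final output: drop it if too short,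
--     # otherwise extend the previous emitted group when it is the same bundle
--     # (id, direction) and close enough, else start a new output group.
--     if run[-1][0][3] - run[0][0][2] > len_cutoff:
--         if out:
--             last = out[-1][-1]
--             if (last[1] == run[0][1] and last[2] == run[0][2]
--                     and abs(run[0][0][2] - last[0][3]) < merge_length):
--                 out[-1].extend(run)
--                 return
--         out.append(run)
--
--
-- def group_smps_by_principle_bundle_id(smps, len_cutoff=2500, merge_length=5000):
--     # Single pass with an accumulator: no intermediate list of all partitions
--     # and no second merge loop — each run is filtered and merged the moment
--     # its key changes.
--     out = []
--     run = []
--     key = None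
--     for smp, info in smps:
--         if info is None:
--             continue
--         d = 0 if smp[4] == info[1] else 1
--         k = (info[0], d)
--         if k != key and run:
--             _flush(run, out, len_cutoff, merge_length)
--             run = []
--         key = k
--         run.append((smp, k[0], d, info[2]))
--     if run:
--         _flush(run, out, len_cutoff, merge_length)
--     return out
-- ===== Notes on version B (the rewrite author's own statement) =====
-- stated objective: simpler
-- what changed: A builds an intermediate list of all filtered partitions and then runs a second merge loop over it; B is a single fused pass that, each time the (bundle id, direction) key changes, immediately filters the finished run by span and merges it into (or appends it to) the final output, so the intermediate all_partitions list and the second loop disappear.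
import Mathlib
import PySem

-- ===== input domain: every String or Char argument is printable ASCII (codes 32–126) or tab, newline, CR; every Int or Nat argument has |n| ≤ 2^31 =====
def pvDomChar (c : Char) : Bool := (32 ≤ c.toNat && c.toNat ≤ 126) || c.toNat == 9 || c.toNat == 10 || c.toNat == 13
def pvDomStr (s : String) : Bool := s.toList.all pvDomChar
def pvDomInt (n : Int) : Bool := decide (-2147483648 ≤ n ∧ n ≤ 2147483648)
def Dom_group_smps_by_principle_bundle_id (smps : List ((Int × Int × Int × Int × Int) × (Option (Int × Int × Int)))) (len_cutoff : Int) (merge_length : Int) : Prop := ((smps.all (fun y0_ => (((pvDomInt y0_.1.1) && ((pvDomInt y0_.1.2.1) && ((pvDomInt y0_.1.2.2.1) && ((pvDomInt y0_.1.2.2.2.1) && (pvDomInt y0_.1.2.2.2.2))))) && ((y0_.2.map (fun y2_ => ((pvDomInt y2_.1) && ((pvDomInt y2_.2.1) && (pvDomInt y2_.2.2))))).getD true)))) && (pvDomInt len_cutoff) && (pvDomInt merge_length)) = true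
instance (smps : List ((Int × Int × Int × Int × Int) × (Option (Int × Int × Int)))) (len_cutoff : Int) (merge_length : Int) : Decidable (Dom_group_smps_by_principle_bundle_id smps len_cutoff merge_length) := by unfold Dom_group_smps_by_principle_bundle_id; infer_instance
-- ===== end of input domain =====

-- B fuses A's two staged loops (partition + filter, then merge) into one pass that flushes each
-- finished run straight into the final output (objective: simpler). Neither version mutates its input.

abbrev pvItem : Type := (Int × Int × Int × Int × Int) × Int × Int × Int
abbrev pvSmp : Type := (Int × Int × Int × Int × Int) × Option (Int × Int × Int)

def pvDflt : pvItem := ((0, 0, 0, 0, 0), 0, 0, 0)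

-- `part[-1][0][3] - part[0][0][2] > len_cutoff` (both sources contain this exact expression; the
-- defaults are never read: the expression is only evaluated on nonempty partitions, as in Python)
def pvSpanGT (len_cutoff : Int) (part : List pvItem) : Bool :=
  decide (len_cutoff < (part.getLastD pvDflt).1.2.2.2.1 - (part.headD pvDflt).1.2.2.1)

-- ===== PORT A =====
-- A's main for-loop: state (pbid, pdirection) as one Option (in A they are None exactly together),
-- all_partitions, new_partition
def pvLoopA (len_cutoff : Int) (pk : Option (Int × Int)) (allp : List (List pvItem)) (newp : List pvItem) :
    List pvSmp → List (List pvItem) × List pvItem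
  | [] => (allp, newp)
  | (_, none) :: rest => pvLoopA len_cutoff pk allp newp rest
  | (smp, some bi) :: rest =>
    let d : Int := if smp.2.2.2.2 = bi.2.1 then 0 else 1
    let bid := bi.1
    let bpos := bi.2.2
    match pk with
    | none => pvLoopA len_cutoff (some (bid, d)) allp [(smp, bid, d, bpos)] rest
    | some k =>
      if (bid, d) ≠ k then
        if pvSpanGT len_cutoff newp then
          pvLoopA len_cutoff (some (bid, d)) (allp ++ [newp]) [(smp, bid, d, bpos)] rest
        else
          pvLoopA len_cutoff (some (bid, d)) allp [(smp, bid, d, bpos)] rest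
      else
        pvLoopA len_cutoff pk allp (newp ++ [(smp, bid, d, bpos)]) rest

-- A's trailing flush of new_partition
def pvFin (len_cutoff : Int) (st : List (List pvItem) × List pvItem) : List (List pvItem) :=
  if st.2.length ≠ 0 ∧ pvSpanGT len_cutoff st.2 = true then st.1 ++ [st.2] else st.1

-- A's merge condition in the second loop
def pvCondA (merge_length : Int) (part p : List pvItem) : Bool :=
  let pe := part.getLastD pvDflt
  let nh := p.headD pvDflt
  decide (pe.2.1 = nh.2.1 ∧ pe.2.2.1 = nh.2.2.1 ∧ |nh.1.2.2.1 - pe.1.2.2.2.1| < merge_length)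

-- A's second for-loop, building rtn_partitions
def pvLoop2 (merge_length : Int) (rtn : List (List pvItem)) (part : List pvItem) :
    List (List pvItem) → List (List pvItem)
  | [] => rtn ++ [part]
  | p :: ps =>
    if pvCondA merge_length part p then pvLoop2 merge_length rtn (part ++ p) ps
    else pvLoop2 merge_length (rtn ++ [part]) p ps

-- 'if len(all_partitions) == 0: return []' plus the second loop
def pvPhase2 (merge_length : Int) (allp : List (List pvItem)) : List (List pvItem) :=
  match allp with
  | [] => []
  | p0 :: ps => pvLoop2 merge_length [] p0 ps

def group_smps_by_principle_bundle_id (smps : List ((Int × Int × Int × Int × Int) × (Option (Int × Int × Int)))) (len_cutoff : Int) (merge_length : Int) : List (List ((Int × Int × Int × Int × Int) × Int × Int × Int)) :=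
  pvPhase2 merge_length (pvFin len_cutoff (pvLoopA len_cutoff none [] [] smps))

-- ===== PORT B =====
-- B's merge condition inside _flush (`last[1]==run[0][1] and last[2]==run[0][2] and abs(...) < ml`,
-- with `last = out[-1][-1]` passed as q's last element)
def pvCondB (merge_length : Int) (q p : List pvItem) : Bool :=
  let qe := q.getLastD pvDflt
  let ph := p.headD pvDflt
  decide (qe.2.1 = ph.2.1 ∧ qe.2.2.1 = ph.2.2.1 ∧ |ph.1.2.2.1 - qe.1.2.2.2.1| < merge_length)

-- Source B's `_flush(run, out, ...)`: out is returned instead of mutated; `out[-1].extend(run)` is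
-- `out.dropLast ++ [out[-1] ++ run]`
def pvFlushB (len_cutoff merge_length : Int) (run : List pvItem) (out : List (List pvItem)) :
    List (List pvItem) :=
  if pvSpanGT len_cutoff run then
    match out.getLast? with
    | some q => if pvCondB merge_length q run then out.dropLast ++ [q ++ run] else out ++ [run]
    | none => out ++ [run]
  else out

-- Source B's single for-loop: state key, run, out; trailing `if run: _flush(...)`
def pvLoopB (len_cutoff merge_length : Int) (key : Option (Int × Int)) (run : List pvItem)
    (out : List (List pvItem)) : List pvSmp → List (List pvItem)
  | [] => if run ≠ [] then pvFlushB len_cutoff merge_length run out else out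
  | (_, none) :: rest => pvLoopB len_cutoff merge_length key run out rest
  | (smp, some bi) :: rest =>
    let d : Int := if smp.2.2.2.2 = bi.2.1 then 0 else 1
    let k := (bi.1, d)
    if some k ≠ key ∧ run ≠ [] then
      pvLoopB len_cutoff merge_length (some k) [(smp, k.1, d, bi.2.2)]
        (pvFlushB len_cutoff merge_length run out) rest
    else
      pvLoopB len_cutoff merge_length (some k) (run ++ [(smp, k.1, d, bi.2.2)]) out rest

def group_smps_by_principle_bundle_id_alt (smps : List ((Int × Int × Int × Int × Int) × (Option (Int × Int × Int)))) (len_cutoff : Int) (merge_length : Int) : List (List ((Int × Int × Int × Int × Int) × Int × Int × Int)) :=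
  pvLoopB len_cutoff merge_length none [] [] smps

-- ===== PRECONDITION & SPEC =====
def Spec_group_smps_by_principle_bundle_id (smps : List ((Int × Int × Int × Int × Int) × (Option (Int × Int × Int)))) (len_cutoff : Int) (merge_length : Int) (out : List (List ((Int × Int × Int × Int × Int) × Int × Int × Int))) : Prop := out = group_smps_by_principle_bundle_id_alt smps len_cutoff merge_length
instance (smps : List ((Int × Int × Int × Int × Int) × (Option (Int × Int × Int)))) (len_cutoff : Int) (merge_length : Int) (out : List (List ((Int × Int × Int × Int × Int) × Int × Int × Int))) : Decidable (Spec_group_smps_by_principle_bundle_id smps len_cutoff merge_length out) := by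
  unfold Spec_group_smps_by_principle_bundle_id
  exact @List.hasDecEq _ (fun a b => List.hasDecEq a b) _ _

-- ===== CLAIM (what is proved, stated in full; the proofs are below) =====
def Claim_equal_group_smps_by_principle_bundle_id : Prop := ∀ (smps : List ((Int × Int × Int × Int × Int) × (Option (Int × Int × Int)))) (len_cutoff : Int) (merge_length : Int), Dom_group_smps_by_principle_bundle_id smps len_cutoff merge_length → Spec_group_smps_by_principle_bundle_id smps len_cutoff merge_length (group_smps_by_principle_bundle_id smps len_cutoff merge_length)

-- ===== LEMMAS AND PROOFS =====

-- Both sides are reduced to the same normal form: the tagged stream, grouped by consecutive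
-- (bid, d) key, filtered by span, folded through a merge step (held in reverse).

-- `(smp, info[0], 0 if smp[4]==info[1] else 1, info[2]) for smp, info in smps if info is not None`
def pvTag (smps : List pvSmp) : List pvItem :=
  smps.filterMap (fun x =>
    x.2.map (fun bi => (x.1, bi.1, if x.1.2.2.2.2 = bi.2.1 then (0 : Int) else 1, bi.2.2)))

def pvKey (it : pvItem) : Int × Int := (it.2.1, it.2.2.1)

-- merge a new (nonempty) run `np` of key `k` into the front of a run list
def pvAbsorb (k : Int × Int) (np : List pvItem) (rs : List (List pvItem)) : List (List pvItem) :=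
  match rs with
  | (y :: ys) :: r => if pvKey y = k then (np ++ y :: ys) :: r else np :: (y :: ys) :: r
  | r => np :: r

-- consecutive grouping by key (bid, d)
def pvGroupby : List pvItem → List (List pvItem)
  | [] => []
  | x :: t => pvAbsorb (pvKey x) [x] (pvGroupby t)

-- one merge step, state kept in reverse order (last emitted group is the head)
def pvMergeStep (merge_length : Int) (rev : List (List pvItem)) (p : List pvItem) : List (List pvItem) :=
  match rev with
  | [] => [p]
  | q :: r => if pvCondB merge_length q p then (q ++ p) :: r else p :: q :: r

-- absorbing two runs of the same key in sequence = absorbing their concatenation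
theorem pvAbsorb_absorb (it : pvItem) (np : List pvItem) (rs : List (List pvItem)) :
    pvAbsorb (pvKey it) np (pvAbsorb (pvKey it) [it] rs) = pvAbsorb (pvKey it) (np ++ [it]) rs := by
  match rs with
  | [] => simp [pvAbsorb]
  | [] :: r => simp [pvAbsorb]
  | (y :: ys) :: r => by_cases h : pvKey y = pvKey it <;> simp [pvAbsorb, h]

-- absorbing a run of a different key just pushes `np` in front
theorem pvAbsorb_ne (it : pvItem) (np : List pvItem) (rs : List (List pvItem)) (k : Int × Int)
    (h : pvKey it ≠ k) :
    pvAbsorb k np (pvAbsorb (pvKey it) [it] rs) = np :: pvAbsorb (pvKey it) [it] rs := by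
  match rs with
  | [] => simp [pvAbsorb, h]
  | [] :: r => simp [pvAbsorb, h]
  | (y :: ys) :: r => by_cases hy : pvKey y = pvKey it <;> simp [pvAbsorb, hy, h]

-- the tagging step on a non-None element
theorem pvTag_cons_some (smp : Int × Int × Int × Int × Int) (bi : Int × Int × Int)
    (rest : List pvSmp) :
    pvTag ((smp, some bi) :: rest)
      = (smp, bi.1, (if smp.2.2.2.2 = bi.2.1 then (0 : Int) else 1), bi.2.2) :: pvTag rest := by
  simp [pvTag]

-- pvLoopA unfolded on a non-None element, mid-run (the `let`s of the definition zeta-reduced)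
theorem pvLoopA_step (len_cutoff : Int) (k : Int × Int) (allp : List (List pvItem))
    (np : List pvItem) (smp : Int × Int × Int × Int × Int) (bi : Int × Int × Int)
    (rest : List pvSmp) :
    pvLoopA len_cutoff (some k) allp np ((smp, some bi) :: rest)
      = (if (bi.1, if smp.2.2.2.2 = bi.2.1 then (0 : Int) else 1) ≠ k then
          (if pvSpanGT len_cutoff np then
            pvLoopA len_cutoff (some (bi.1, if smp.2.2.2.2 = bi.2.1 then (0 : Int) else 1))
              (allp ++ [np])
              [(smp, bi.1, (if smp.2.2.2.2 = bi.2.1 then (0 : Int) else 1), bi.2.2)] rest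
          else
            pvLoopA len_cutoff (some (bi.1, if smp.2.2.2.2 = bi.2.1 then (0 : Int) else 1)) allp
              [(smp, bi.1, (if smp.2.2.2.2 = bi.2.1 then (0 : Int) else 1), bi.2.2)] rest)
        else
          pvLoopA len_cutoff (some k) allp
            (np ++ [(smp, bi.1, (if smp.2.2.2.2 = bi.2.1 then (0 : Int) else 1), bi.2.2)]) rest) := by
  rfl

-- main invariant for A's first loop, mid-run
theorem pvLoopA_invariant (len_cutoff : Int) (smps : List pvSmp) :
    ∀ (k : Int × Int) (allp : List (List pvItem)) (np : List pvItem), np ≠ [] →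
    pvFin len_cutoff (pvLoopA len_cutoff (some k) allp np smps)
      = allp ++ (pvAbsorb k np (pvGroupby (pvTag smps))).filter (pvSpanGT len_cutoff) := by
  induction smps with
  | nil =>
    intro k allp np hnp
    have h0 : np.length ≠ 0 := by simpa using hnp
    by_cases h : pvSpanGT len_cutoff np = true <;>
      simp [pvLoopA, pvFin, pvTag, pvGroupby, pvAbsorb, h0, h]
  | cons x rest ih =>
    intro k allp np hnp
    match x with
    | (smp, none) => simpa [pvLoopA, pvTag] using ih k allp np hnp
    | (smp, some bi) =>
      rw [pvLoopA_step, pvTag_cons_some, pvGroupby]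
      generalize (if smp.2.2.2.2 = bi.2.1 then (0 : Int) else 1) = d
      have hkey : pvKey (smp, bi.1, d, bi.2.2) = (bi.1, d) := rfl
      by_cases hne : (bi.1, d) = k
      · rw [if_neg (by simp [hne])]
        rw [ih k allp (np ++ [(smp, bi.1, d, bi.2.2)]) (by simp)]
        subst hne
        rw [← hkey, pvAbsorb_absorb]
      · rw [if_pos hne]
        by_cases hsp : pvSpanGT len_cutoff np = true
        · rw [if_pos hsp, ih (bi.1, d) (allp ++ [np]) [(smp, bi.1, d, bi.2.2)] (by simp)]
          rw [← hkey, pvAbsorb_ne _ np _ k (by rw [hkey]; exact hne)]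
          rw [List.filter_cons]
          simp [hsp]
        · rw [if_neg hsp, ih (bi.1, d) allp [(smp, bi.1, d, bi.2.2)] (by simp)]
          rw [← hkey, pvAbsorb_ne _ np _ k (by rw [hkey]; exact hne)]
          rw [List.filter_cons]
          simp [hsp]

-- phase 1 of A = consecutive grouping + span filter
theorem pvPhase1_eq (smps : List pvSmp) (len_cutoff : Int) :
    pvFin len_cutoff (pvLoopA len_cutoff none [] [] smps)
      = (pvGroupby (pvTag smps)).filter (pvSpanGT len_cutoff) := by
  induction smps with
  | nil => simp [pvLoopA, pvFin, pvTag, pvGroupby]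
  | cons x rest ih =>
    match x with
    | (smp, none) => simpa [pvLoopA, pvTag] using ih
    | (smp, some bi) =>
      rw [show pvLoopA len_cutoff none [] [] ((smp, some bi) :: rest)
          = pvLoopA len_cutoff
              (some (bi.1, if smp.2.2.2.2 = bi.2.1 then (0 : Int) else 1)) []
              [(smp, bi.1, (if smp.2.2.2.2 = bi.2.1 then (0 : Int) else 1), bi.2.2)] rest from rfl]
      rw [pvTag_cons_some, pvGroupby]
      generalize (if smp.2.2.2.2 = bi.2.1 then (0 : Int) else 1) = d
      rw [pvLoopA_invariant len_cutoff rest (bi.1, d) [] [(smp, bi.1, d, bi.2.2)] (by simp)]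
      rw [show pvKey (smp, bi.1, d, bi.2.2) = (bi.1, d) from rfl]
      simp

-- A's second loop = the merge fold (state held reversed)
theorem pvLoop2_eq_fold (merge_length : Int) :
    ∀ (ps : List (List pvItem)) (rtn : List (List pvItem)) (part : List pvItem),
    pvLoop2 merge_length rtn part ps
      = (ps.foldl (pvMergeStep merge_length) (part :: rtn.reverse)).reverse := by
  intro ps
  induction ps with
  | nil => intro rtn part; simp [pvLoop2]
  | cons p ps ih =>
    intro rtn part
    have hBA : pvCondB merge_length part p = pvCondA merge_length part p := rfl
    by_cases h : pvCondA merge_length part p = true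
    · rw [show pvLoop2 merge_length rtn part (p :: ps) = pvLoop2 merge_length rtn (part ++ p) ps by
        simp [pvLoop2, h]]
      rw [ih rtn (part ++ p), List.foldl_cons]
      rw [show pvMergeStep merge_length (part :: rtn.reverse) p = (part ++ p) :: rtn.reverse by
        simp [pvMergeStep, hBA, h]]
    · rw [show pvLoop2 merge_length rtn part (p :: ps)
          = pvLoop2 merge_length (rtn ++ [part]) p ps by simp [pvLoop2, h]]
      rw [ih (rtn ++ [part]) p, List.foldl_cons]
      rw [show pvMergeStep merge_length (part :: rtn.reverse) p = p :: part :: rtn.reverse by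
        simp [pvMergeStep, hBA, h]]
      simp

-- phase 2 of A = the merge fold over the whole kept list
theorem pvPhase2_eq (merge_length : Int) (allp : List (List pvItem)) :
    pvPhase2 merge_length allp = (allp.foldl (pvMergeStep merge_length) []).reverse := by
  match allp with
  | [] => simp [pvPhase2]
  | p0 :: ps =>
    rw [pvPhase2, List.foldl_cons]
    rw [show pvMergeStep merge_length [] p0 = [p0] from rfl]
    simpa using pvLoop2_eq_fold merge_length ps [] p0

-- B's flush = one conditional merge step on the reversed output
theorem pvFlushB_eq (len_cutoff merge_length : Int) (run : List pvItem) (out : List (List pvItem)) :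
    pvFlushB len_cutoff merge_length run out
      = if pvSpanGT len_cutoff run then (pvMergeStep merge_length out.reverse run).reverse
        else out := by
  rcases List.eq_nil_or_concat out with h | ⟨ys, q, h⟩
  · subst h; simp [pvFlushB, pvMergeStep]
  · subst h
    by_cases hc : pvCondB merge_length q run = true <;>
      simp [pvFlushB, pvMergeStep, hc]

-- main invariant for B's loop, mid-run
theorem pvLoopB_invariant (len_cutoff merge_length : Int) (smps : List pvSmp) :
    ∀ (k : Int × Int) (run : List pvItem) (out : List (List pvItem)), run ≠ [] →
    pvLoopB len_cutoff merge_length (some k) run out smps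
      = (((pvAbsorb k run (pvGroupby (pvTag smps))).filter
            (pvSpanGT len_cutoff)).foldl (pvMergeStep merge_length) out.reverse).reverse := by
  induction smps with
  | nil =>
    intro k run out hr
    rw [show pvLoopB len_cutoff merge_length (some k) run out []
        = if run ≠ [] then pvFlushB len_cutoff merge_length run out else out from rfl]
    rw [if_pos hr, pvFlushB_eq]
    by_cases h : pvSpanGT len_cutoff run = true <;>
      simp [pvTag, pvGroupby, pvAbsorb, List.filter, h]
  | cons x rest ih =>
    intro k run out hr
    match x with
    | (smp, none) => simpa [pvLoopB, pvTag] using ih k run out hr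
    | (smp, some bi) =>
      rw [show pvLoopB len_cutoff merge_length (some k) run out ((smp, some bi) :: rest)
          = (if some (bi.1, if smp.2.2.2.2 = bi.2.1 then (0 : Int) else 1) ≠ some k ∧ run ≠ [] then
              pvLoopB len_cutoff merge_length
                (some (bi.1, if smp.2.2.2.2 = bi.2.1 then (0 : Int) else 1))
                [(smp, bi.1, (if smp.2.2.2.2 = bi.2.1 then (0 : Int) else 1), bi.2.2)]
                (pvFlushB len_cutoff merge_length run out) rest
            else
              pvLoopB len_cutoff merge_length
                (some (bi.1, if smp.2.2.2.2 = bi.2.1 then (0 : Int) else 1))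
                (run ++ [(smp, bi.1, (if smp.2.2.2.2 = bi.2.1 then (0 : Int) else 1), bi.2.2)])
                out rest) from rfl]
      rw [pvTag_cons_some, pvGroupby]
      generalize (if smp.2.2.2.2 = bi.2.1 then (0 : Int) else 1) = d
      have hkey : pvKey (smp, bi.1, d, bi.2.2) = (bi.1, d) := rfl
      by_cases hne : (bi.1, d) = k
      · subst hne
        rw [if_neg (by simp)]
        rw [ih (bi.1, d) (run ++ [(smp, bi.1, d, bi.2.2)]) out (by simp)]
        rw [← hkey, pvAbsorb_absorb]
      · rw [if_pos ⟨by simp [hne], hr⟩]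
        rw [ih (bi.1, d) [(smp, bi.1, d, bi.2.2)] (pvFlushB len_cutoff merge_length run out)
          (by simp)]
        rw [← hkey, pvAbsorb_ne _ run _ k (by rw [hkey]; exact hne)]
        rw [List.filter_cons, pvFlushB_eq]
        by_cases hsp : pvSpanGT len_cutoff run = true <;> simp [hsp]

-- B = consecutive grouping + span filter + merge fold
theorem pvLoopB_eq (smps : List pvSmp) (len_cutoff merge_length : Int) :
    pvLoopB len_cutoff merge_length none [] [] smps
      = (((pvGroupby (pvTag smps)).filter (pvSpanGT len_cutoff)).foldl
          (pvMergeStep merge_length) []).reverse := by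
  induction smps with
  | nil => simp [pvLoopB, pvTag, pvGroupby]
  | cons x rest ih =>
    match x with
    | (smp, none) => simpa [pvLoopB, pvTag] using ih
    | (smp, some bi) =>
      rw [show pvLoopB len_cutoff merge_length none [] [] ((smp, some bi) :: rest)
          = pvLoopB len_cutoff merge_length
              (some (bi.1, if smp.2.2.2.2 = bi.2.1 then (0 : Int) else 1))
              [(smp, bi.1, (if smp.2.2.2.2 = bi.2.1 then (0 : Int) else 1), bi.2.2)] [] rest from rfl]
      rw [pvTag_cons_some, pvGroupby]
      generalize (if smp.2.2.2.2 = bi.2.1 then (0 : Int) else 1) = d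
      rw [pvLoopB_invariant len_cutoff merge_length rest (bi.1, d)
        [(smp, bi.1, d, bi.2.2)] [] (by simp)]
      rw [show pvKey (smp, bi.1, d, bi.2.2) = (bi.1, d) from rfl]
      simp

-- ===== VERDICT (by name: the statement is the Claim_ definition above) =====
theorem group_smps_by_principle_bundle_id_spec : Claim_equal_group_smps_by_principle_bundle_id := by
  intro smps len_cutoff merge_length _
  unfold Spec_group_smps_by_principle_bundle_id
  unfold group_smps_by_principle_bundle_id group_smps_by_principle_bundle_id_alt
  rw [pvPhase1_eq, pvPhase2_eq, pvLoopB_eq]
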